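-- pv_equiv track=rewrite | github.com/chloeklin/Summer-Project-Advanced-and-Interpretable-Unsupervised-Learning | .ipynb_checkpoints/ILS_class-checkpoint.py | mintillmax
-- ===== SOURCE A (Python) =====
-- def mintillmax(sublst, maxthreshold):
--     '''
--     Given a list and a threshold, find the minimum element until exceeding the threshold.
--     If the threshold is exceeded immediately return none as this is not a local maximum
--     INPUTS:
--         sublst = list to iterate through
--         maxthreshold = threshold that triggers the iteration to stop if exceeded
--     OUTPUTS:
--         minimum = minimum element found
--     '''
--     minimum = None
--
--     for i in range(len(sublst)):
--         if sublst[i] > maxthreshold: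
--             break
--         if minimum is None or sublst[i] < minimum:
--             minimum = sublst[i]
--
--     return minimum
-- ===== SOURCE B (Python) =====
-- def mintillmax(sublst, maxthreshold):
--     # Right-to-left scan: an element exceeding the threshold invalidates
--     # everything seen so far (to its right), since A stops at the first
--     # exceeding element; otherwise merge into the running minimum.
--     res = None
--     for x in reversed(sublst):
--         if x > maxthreshold:
--             res = None
--         elif res is None:
--             res = x
--         else:
--             res = min(x, res)
--     return res
-- ===== Notes on version B (the rewrite author's own statement) =====
-- stated objective: alternative
-- what changed: Replaces A's left-to-right break-loop by a right-to-left fold with a different recurrence: an over-threshold element resets the state to None (discarding everything to its right), otherwise it merges into the running minimum; no break and no prefix extraction.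
import Mathlib
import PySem

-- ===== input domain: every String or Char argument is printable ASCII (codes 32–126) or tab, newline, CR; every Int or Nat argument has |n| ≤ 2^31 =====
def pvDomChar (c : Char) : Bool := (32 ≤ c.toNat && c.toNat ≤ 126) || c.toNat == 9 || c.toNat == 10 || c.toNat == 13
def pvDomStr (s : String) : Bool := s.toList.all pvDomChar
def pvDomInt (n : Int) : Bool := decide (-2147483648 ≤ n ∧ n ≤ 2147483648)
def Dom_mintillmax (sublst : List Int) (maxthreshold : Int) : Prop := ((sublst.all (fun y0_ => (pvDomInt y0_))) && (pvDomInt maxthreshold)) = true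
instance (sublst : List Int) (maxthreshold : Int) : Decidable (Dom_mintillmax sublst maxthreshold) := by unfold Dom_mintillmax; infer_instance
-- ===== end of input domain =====

-- B replaces A's left-to-right break-loop by a right-to-left fold whose over-threshold elements reset the state to None (objective: alternative).

-- ===== PORT A =====
-- A's index loop with break, carrying the running minimum accumulator
def mintillmaxGo (t : Int) : List Int → Option Int → Option Int
  | [], m => m
  | x :: xs, m =>
    if x > t then m
    else mintillmaxGo t xs
      (match m with
       | none => some x
       | some v => if x < v then some x else some v)

def mintillmax (sublst : List Int) (maxthreshold : Int) : Option Int :=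
  mintillmaxGo maxthreshold sublst none

-- ===== PORT B =====
-- for x in reversed(sublst): reset on x > t, else merge into the running minimum
def mintillmax_alt (sublst : List Int) (maxthreshold : Int) : Option Int :=
  sublst.reverse.foldl
    (fun res x =>
      if x > maxthreshold then none
      else
        match res with
        | none => some x
        | some v => some (min x v))
    none

-- ===== PRECONDITION & SPEC =====
def Spec_mintillmax (sublst : List Int) (maxthreshold : Int) (out : Option Int) : Prop := out = mintillmax_alt sublst maxthreshold
instance (sublst : List Int) (maxthreshold : Int) (out : Option Int) : Decidable (Spec_mintillmax sublst maxthreshold out) := by unfold Spec_mintillmax; infer_instance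

-- ===== CLAIM (what is proved, stated in full; the proofs are below) =====
def Claim_equal_mintillmax : Prop := ∀ (sublst : List Int) (maxthreshold : Int), Dom_mintillmax sublst maxthreshold → Spec_mintillmax sublst maxthreshold (mintillmax sublst maxthreshold)

-- ===== LEMMAS AND PROOFS =====
-- combine an accumulator with an optional minimum (what A's loop computes on top of m)
def optMin : Option Int → Option Int → Option Int
  | none, r => r
  | some v, none => some v
  | some v, some w => if w < v then some w else some v

theorem optMin_none_left (r : Option Int) : optMin none r = r := rfl
theorem optMin_some_none (v : Int) : optMin (some v) none = some v := rfl
theorem optMin_some_some (v w : Int) : optMin (some v) (some w) = some (min v w) := by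
  simp only [optMin]; rw [min_def]; split_ifs <;> first | rfl | (exfalso; omega)

theorem optMin_assoc (a b c : Option Int) :
    optMin (optMin a b) c = optMin a (optMin b c) := by
  cases a <;> cases b <;> cases c <;>
    simp only [optMin_none_left, optMin_some_none, optMin_some_some, min_assoc]

theorem optMin_some (m : Option Int) (x : Int) :
    (match m with
     | none => some x
     | some v => if x < v then some x else some v) = optMin m (some x) := by
  cases m <;> rfl

-- peel one head element off B's reversed fold
theorem alt_cons (t x : Int) (xs : List Int) :
    mintillmax_alt (x :: xs) t =
      (if x > t then none
       else match mintillmax_alt xs t with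
            | none => some x
            | some v => some (min x v)) := by
  simp [mintillmax_alt, List.foldl_append]

theorem alt_cons_le (t x : Int) (xs : List Int) (hx : ¬ x > t) :
    mintillmax_alt (x :: xs) t = optMin (some x) (mintillmax_alt xs t) := by
  rw [alt_cons, if_neg hx]
  cases h : mintillmax_alt xs t with
  | none => rfl
  | some v => simp [optMin_some_some]

theorem alt_cons_gt (t x : Int) (xs : List Int) (hx : x > t) :
    mintillmax_alt (x :: xs) t = none := by
  rw [alt_cons, if_pos hx]

theorem go_eq_optMin (t : Int) (xs : List Int) (m : Option Int) :
    mintillmaxGo t xs m = optMin m (mintillmax_alt xs t) := by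
  induction xs generalizing m with
  | nil => cases m <;> simp [mintillmaxGo, mintillmax_alt, optMin]
  | cons x xs ih =>
    by_cases hx : x > t
    · rw [mintillmaxGo.eq_def]; simp only [if_pos hx]
      rw [alt_cons_gt t x xs hx]; cases m <;> rfl
    · rw [mintillmaxGo.eq_def]; simp only [if_neg hx]
      rw [optMin_some, ih, alt_cons_le t x xs hx, optMin_assoc]

-- ===== VERDICT (by name: the statement is the Claim_ definition above) =====
theorem mintillmax_spec : Claim_equal_mintillmax := by
  intro sublst maxthreshold _
  unfold Spec_mintillmax mintillmax
  rw [go_eq_optMin]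
  rfl
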